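-- pv_equiv track=rewrite | github.com/SimonDaKappa/RPI-Work | Intro to Computer Science/Homework/hw3_files (1)/hw3_files/hw3_part3.py | touristcount
-- ===== SOURCE A (Python) =====
-- def touristcount(bears,berries):
--     temp = 0
--     if(bears <4 or bears > 15):
--         return 0
--     else:
--         for count in range(bears):
--             if(count <= 10):
--                 temp += 10000
--             else:
--                 temp += 20000
--         if(bears>10):
--             temp+=10000
--     return temp
-- ===== SOURCE B (Python) =====
-- def touristcount(bears, berries):
--     if bears < 4 or bears > 15:
--         return 0
--     return 10000 * min(bears, 11) + 20000 * max(0, bears - 11) + (10000 if bears > 10 else 0)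
-- ===== Notes on version B (the rewrite author's own statement) =====
-- stated objective: simpler
-- what changed: Replaces the per-bear accumulation loop with a closed-form arithmetic formula (10000 for the first min(bears,11) steps, 20000 for the rest, plus the >10 bonus).
import Mathlib
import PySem

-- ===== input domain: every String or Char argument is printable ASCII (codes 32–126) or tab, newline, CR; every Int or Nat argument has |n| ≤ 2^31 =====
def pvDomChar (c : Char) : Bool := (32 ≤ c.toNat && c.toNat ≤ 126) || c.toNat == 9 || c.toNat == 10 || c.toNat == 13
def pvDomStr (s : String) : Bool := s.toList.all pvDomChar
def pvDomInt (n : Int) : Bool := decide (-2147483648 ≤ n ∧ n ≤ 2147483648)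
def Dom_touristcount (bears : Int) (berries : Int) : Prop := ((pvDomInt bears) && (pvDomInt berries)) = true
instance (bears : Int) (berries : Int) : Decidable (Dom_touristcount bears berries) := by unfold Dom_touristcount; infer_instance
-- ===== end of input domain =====

-- B replaces A's per-bear accumulation loop by a closed-form formula (simpler, O(1)); return values agree everywhere.

-- ===== PORT A =====
def touristcount (bears : Int) (berries : Int) : Int :=
  let temp : Int := 0
  if bears < 4 ∨ bears > 15 then 0
  else
    let temp := (PySem.List.pyRange 0 bears 1).foldl
      (fun temp count => if count ≤ 10 then temp + 10000 else temp + 20000) temp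
    let temp := if bears > 10 then temp + 10000 else temp
    temp

-- ===== PORT B =====
def touristcount_alt (bears : Int) (berries : Int) : Int :=
  if bears < 4 ∨ bears > 15 then 0
  else 10000 * min bears 11 + 20000 * max 0 (bears - 11) + (if bears > 10 then 10000 else 0)

-- ===== PRECONDITION & SPEC =====
def Spec_touristcount (bears : Int) (berries : Int) (out : Int) : Prop := out = touristcount_alt bears berries
instance (bears : Int) (berries : Int) (out : Int) : Decidable (Spec_touristcount bears berries out) := by unfold Spec_touristcount; infer_instance

-- ===== CLAIM (what is proved, stated in full; the proofs are below) =====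
def Claim_equal_touristcount : Prop := ∀ (bears : Int) (berries : Int), Dom_touristcount bears berries → Spec_touristcount bears berries (touristcount bears berries)

-- ===== LEMMAS AND PROOFS =====
theorem touristcount_eq (bears berries : Int) :
    touristcount bears berries = touristcount_alt bears berries := by
  by_cases h : bears < 4 ∨ bears > 15
  · simp [touristcount, touristcount_alt, h]
  · push Not at h
    obtain ⟨h4, h15⟩ := h
    interval_cases bears <;> (unfold touristcount touristcount_alt; decide)

-- ===== VERDICT (by name: the statement is the Claim_ definition above) =====
theorem touristcount_spec : Claim_equal_touristcount := by
  intro bears berries _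
  exact touristcount_eq bears berries
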